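-- pv_equiv track=rewrite | github.com/sssldp/privmdc | privmdc.py | define_initial_cell_list_lens
-- ===== SOURCE A (Python) =====
-- def define_initial_cell_list_lens(domain, gran):
--     remaining_domain = domain
--     remaining_g = gran
--     cell_length_list = []
--     while remaining_g > 0:
--         cur_cell_len = remaining_domain // remaining_g
--         cell_length_list.append(cur_cell_len)
--         remaining_domain -= cur_cell_len
--         remaining_g -= 1
--     return cell_length_list
-- ===== SOURCE B (Python) =====
-- def define_initial_cell_list_lens(domain, gran):
--     if gran <= 0:
--         return []
--     base, rem = divmod(domain, gran)
--     return [base + (1 if i >= gran - rem else 0) for i in range(gran)]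
-- ===== Notes on version B (the rewrite author's own statement) =====
-- stated objective: simpler
-- what changed: Replaced the stateful greedy loop threading remaining_domain/remaining_g with a closed form: one divmod gives base = domain//gran, and the last domain%gran cells get one extra unit (no per-step division).
import Mathlib
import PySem

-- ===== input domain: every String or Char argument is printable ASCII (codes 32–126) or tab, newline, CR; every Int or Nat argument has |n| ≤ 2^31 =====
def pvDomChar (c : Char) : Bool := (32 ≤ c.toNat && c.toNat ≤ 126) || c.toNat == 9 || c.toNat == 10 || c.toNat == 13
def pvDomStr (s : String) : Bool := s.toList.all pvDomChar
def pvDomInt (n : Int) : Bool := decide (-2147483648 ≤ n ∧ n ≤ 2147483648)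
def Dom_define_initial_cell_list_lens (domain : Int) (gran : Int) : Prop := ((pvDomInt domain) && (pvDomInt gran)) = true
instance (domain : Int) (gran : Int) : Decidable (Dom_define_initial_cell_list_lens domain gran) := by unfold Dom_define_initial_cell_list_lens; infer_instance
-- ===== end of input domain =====

-- B replaces A's stateful greedy loop with a closed-form per-index list (same cost, simpler).

-- ===== PORT A =====
-- the while-loop of A: state (remaining_domain, remaining_g, cell_length_list)
def pvLoopA (r g : Int) (acc : List Int) : List Int :=
  if _h : 0 < g then
    pvLoopA (r - PySem.Int.floordiv r g) (g - 1) (acc ++ [PySem.Int.floordiv r g])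
  else acc
termination_by g.toNat
decreasing_by omega

def define_initial_cell_list_lens (domain : Int) (gran : Int) : List Int :=
  pvLoopA domain gran []

-- ===== PORT B =====
def define_initial_cell_list_lens_alt (domain : Int) (gran : Int) : List Int :=
  if gran ≤ 0 then []
  else
    (PySem.List.pyRange 0 gran 1).map
      (fun i => PySem.Int.floordiv domain gran +
        if gran - PySem.Int.mod domain gran ≤ i then 1 else 0)

-- ===== PRECONDITION & SPEC =====
def Spec_define_initial_cell_list_lens (domain : Int) (gran : Int) (out : List Int) : Prop := out = define_initial_cell_list_lens_alt domain gran
instance (domain : Int) (gran : Int) (out : List Int) : Decidable (Spec_define_initial_cell_list_lens domain gran out) := by unfold Spec_define_initial_cell_list_lens; infer_instance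

-- ===== CLAIM (what is proved, stated in full; the proofs are below) =====
def Claim_equal_define_initial_cell_list_lens : Prop := ∀ (domain : Int) (gran : Int), Dom_define_initial_cell_list_lens domain gran → Spec_define_initial_cell_list_lens domain gran (define_initial_cell_list_lens domain gran)

-- ===== LEMMAS AND PROOFS =====

-- prepend the head cell to a shifted (g-1)-range map
theorem pvConsRange (g c : Int) (h0 : 0 < g) (f f' : Int → Int)
    (hc : c = f 0) (ht : ∀ j : Int, 0 ≤ j → j < g - 1 → f' j = f (j + 1)) :
    [c] ++ (PySem.List.pyRange (0:Int) (g-1) 1).map f' = (PySem.List.pyRange (0:Int) g 1).map f := by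
  rw [PySem.List.pyRange_one, PySem.List.pyRange_one]
  have hn : (g - 0).toNat = (g - 1 - 0).toNat + 1 := by omega
  rw [hn, List.range_succ_eq_map]
  simp only [List.map_cons, List.map_map, List.singleton_append]
  refine List.cons_eq_cons.mpr ⟨by simpa using hc, ?_⟩
  apply List.map_congr_left
  intro j hj
  have hjlt : j < (g - 1 - 0).toNat := List.mem_range.mp hj
  simp only [Function.comp, zero_add, Nat.succ_eq_add_one]
  rw [ht (j : Int) (by positivity) (by omega)]
  push_cast
  ring_nf

-- A's greedy loop computes exactly the balanced distribution: base everywhere,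
-- one extra on the last (r mod g) cells.
theorem pvLoopA_closed : ∀ (n : Nat) (g r : Int) (acc : List Int), g.toNat = n → 0 < g →
    pvLoopA r g acc = acc ++ (PySem.List.pyRange 0 g 1).map
      (fun i => PySem.Int.floordiv r g + if g - PySem.Int.mod r g ≤ i then 1 else 0) := by
  intro n
  induction n with
  | zero => intro g r acc hg h0; omega
  | succ k ih =>
    intro g r acc hg h0
    rw [pvLoopA, dif_pos h0]
    have hrm := PySem.Int.floordiv_mul_add_mod r g
    have hm0 := PySem.Int.mod_nonneg r h0
    have hmlt := PySem.Int.mod_lt r h0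
    set b := PySem.Int.floordiv r g with hb
    set m := PySem.Int.mod r g with hm
    have hr' : r - b = b * (g - 1) + m := by linear_combination -hrm
    by_cases h1 : g = 1
    · subst h1
      rw [pvLoopA]
      simp only [sub_self, lt_irrefl, dite_false]
      have hm1 : m = 0 := by omega
      rw [PySem.List.pyRange_one_cons (by norm_num : (0:Int) < 1),
          PySem.List.pyRange_one_eq_nil (by norm_num : (1:Int) ≤ 0+1)]
      simp [hm1]
    · have h0' : 0 < g - 1 := by omega
      by_cases hc : m < g - 1
      · -- extra units not yet reached: quotient stays b, remainder stays m
        have hb' : PySem.Int.floordiv (r - b) (g - 1) = b := by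
          rw [PySem.Int.floordiv_eq_iff_of_pos h0']
          constructor
          · rw [hr']; linarith
          · rw [hr']; nlinarith
        have hm' : PySem.Int.mod (r - b) (g - 1) = m := by
          have := PySem.Int.floordiv_mul_add_mod (r - b) (g - 1)
          rw [hb'] at this
          linear_combination this + hr'
        rw [ih (g - 1) (r - b) (acc ++ [b]) (by omega) h0', hb', hm', List.append_assoc]
        congr 1
        apply pvConsRange g b h0
        · have h00 : ¬ (g - m ≤ (0 : Int)) := by omega
          simp [h00]
        · intro j hj0 hjlt
          split_ifs with hA hB hB <;> first | rfl | omega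
      · -- m = g-1: next quotient is b+1, remainder 0
        have hcm : m = g - 1 := by omega
        have hb' : PySem.Int.floordiv (r - b) (g - 1) = b + 1 := by
          rw [PySem.Int.floordiv_eq_iff_of_pos h0']
          constructor
          · rw [hr', hcm]; nlinarith
          · rw [hr', hcm]; nlinarith
        have hm' : PySem.Int.mod (r - b) (g - 1) = 0 := by
          have := PySem.Int.floordiv_mul_add_mod (r - b) (g - 1)
          rw [hb'] at this
          linear_combination this + hr' + hcm
        rw [ih (g - 1) (r - b) (acc ++ [b]) (by omega) h0', hb', hm', List.append_assoc]
        congr 1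
        apply pvConsRange g b h0
        · have h00 : ¬ (g - m ≤ (0 : Int)) := by omega
          simp [h00]
        · intro j hj0 hjlt
          split_ifs with hA hB hB <;> first | rfl | omega

-- ===== VERDICT (by name: the statement is the Claim_ definition above) =====
theorem define_initial_cell_list_lens_spec : Claim_equal_define_initial_cell_list_lens := by
  intro domain gran _
  unfold Spec_define_initial_cell_list_lens define_initial_cell_list_lens define_initial_cell_list_lens_alt
  by_cases h : 0 < gran
  · rw [if_neg (by omega), pvLoopA_closed gran.toNat gran domain [] rfl h, List.nil_append]
  · rw [if_pos (by omega), pvLoopA, dif_neg h]
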